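-- pv_equiv track=rewrite | github.com/dsuarezmarra/spellloop | project/tools/analyze_single_spritesheet.py | find_gaps
-- ===== SOURCE A (Python) =====
-- def find_gaps(has_content_array):
--     """Encuentra gaps (secuencias de False) en un array booleano."""
--     gaps = []
--     in_gap = False
--     gap_start = 0
--     min_gap_size = 3  # Mínimo 3 píxeles para considerar gap
--
--     for i, has_content in enumerate(has_content_array):
--         if not has_content:
--             if not in_gap:
--                 in_gap = True
--                 gap_start = i
--         else:
--             if in_gap:
--                 gap_end = i - 1
--                 if gap_end - gap_start + 1 >= min_gap_size:
--                     gaps.append((gap_start, gap_end))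
--                 in_gap = False
--
--     # Cerrar gap final si existe
--     if in_gap:
--         gap_end = len(has_content_array) - 1
--         if gap_end - gap_start + 1 >= min_gap_size:
--             gaps.append((gap_start, gap_end))
--
--     return gaps
-- ===== SOURCE B (Python) =====
-- def find_gaps(has_content_array):
--     """Encuentra gaps (secuencias de False) en un array booleano."""
--     n = len(has_content_array)
--     trues = [-1] + [i for i, v in enumerate(has_content_array) if v] + [n]
--     return [(p + 1, q - 1) for p, q in zip(trues, trues[1:]) if q - p - 1 >= 3]
-- ===== Notes on version B (the rewrite author's own statement) =====
-- stated objective: alternative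
-- what changed: Replaces A's in_gap/gap_start state machine (with trailing close-out branch) by a staged boundary computation: build the list of True indices padded with sentinels -1 and len(arr), then derive each gap from consecutive True positions p,q with q-p-1 >= 3 as (p+1, q-1).
import Mathlib
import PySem

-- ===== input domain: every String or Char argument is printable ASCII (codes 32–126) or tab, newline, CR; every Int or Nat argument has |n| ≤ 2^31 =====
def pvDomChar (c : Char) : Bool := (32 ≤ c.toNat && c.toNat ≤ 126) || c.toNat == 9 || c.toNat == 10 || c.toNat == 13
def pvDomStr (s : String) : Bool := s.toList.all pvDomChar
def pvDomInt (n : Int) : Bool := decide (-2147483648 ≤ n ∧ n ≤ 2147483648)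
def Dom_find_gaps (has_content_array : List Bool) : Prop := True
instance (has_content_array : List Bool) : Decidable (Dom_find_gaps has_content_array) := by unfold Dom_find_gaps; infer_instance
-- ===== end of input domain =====

-- B replaces A's in_gap/gap_start state machine (with trailing close-out) by a staged boundary
-- computation: collect True indices with sentinels -1 and len, then read gaps off consecutive pairs.


-- ===== PORT A =====
-- the for-loop over enumerate(has_content_array): state = (gaps, in_gap, gap_start), index i
def find_gaps_loopA : List Bool → Int → Bool → Int → List (Int × Int) → (List (Int × Int) × Bool × Int)
  | [], _, in_gap, gap_start, gaps => (gaps, in_gap, gap_start)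
  | b :: rest, i, in_gap, gap_start, gaps =>
    if !b then
      if !in_gap then find_gaps_loopA rest (i + 1) true i gaps
      else find_gaps_loopA rest (i + 1) in_gap gap_start gaps
    else
      if in_gap then
        let gap_end := i - 1
        find_gaps_loopA rest (i + 1) false gap_start
          (if gap_end - gap_start + 1 ≥ 3 then gaps ++ [(gap_start, gap_end)] else gaps)
      else find_gaps_loopA rest (i + 1) in_gap gap_start gaps

def find_gaps (has_content_array : List Bool) : List (Int × Int) :=
  match find_gaps_loopA has_content_array 0 false 0 [] with
  | (gaps, in_gap, gap_start) =>
    if in_gap then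
      let gap_end : Int := (has_content_array.length : Int) - 1
      if gap_end - gap_start + 1 ≥ 3 then gaps ++ [(gap_start, gap_end)] else gaps
    else gaps

-- ===== PORT B =====
-- [i for i, v in enumerate(arr) if v]: the indices of the True entries
def find_gaps_trueIdxs : List Bool → Int → List Int
  | [], _ => []
  | b :: rest, i => (if b then [i] else []) ++ find_gaps_trueIdxs rest (i + 1)

-- [(p+1, q-1) for p, q in zip(trues, trues[1:]) if q - p - 1 >= 3]: scan of adjacent pairs
def find_gaps_pairsB : List Int → List (Int × Int)
  | p :: q :: r => (if q - p - 1 ≥ 3 then [(p + 1, q - 1)] else []) ++ find_gaps_pairsB (q :: r)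
  | _ => []

def find_gaps_alt (has_content_array : List Bool) : List (Int × Int) :=
  find_gaps_pairsB ([-1] ++ find_gaps_trueIdxs has_content_array 0 ++ [(has_content_array.length : Int)])

-- ===== PRECONDITION & SPEC =====
def Spec_find_gaps (has_content_array : List Bool) (out : List (Int × Int)) : Prop := out = find_gaps_alt has_content_array
instance (has_content_array : List Bool) (out : List (Int × Int)) : Decidable (Spec_find_gaps has_content_array out) := by unfold Spec_find_gaps; infer_instance

-- ===== CLAIM (what is proved, stated in full; the proofs are below) =====
def Claim_equal_find_gaps : Prop := ∀ (has_content_array : List Bool), Dom_find_gaps has_content_array → Spec_find_gaps has_content_array (find_gaps has_content_array)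

-- ===== LEMMAS AND PROOFS =====

-- A's loop followed by the trailing close-out, where the final index is i + xs.length
def resA (xs : List Bool) (i : Int) (in_gap : Bool) (gap_start : Int)
    (gaps : List (Int × Int)) : List (Int × Int) :=
  match find_gaps_loopA xs i in_gap gap_start gaps with
  | (gaps', g, gs') =>
    if g then
      if (i + (xs.length : Int) - 1) - gs' + 1 ≥ 3 then gaps' ++ [(gs', i + (xs.length : Int) - 1)]
      else gaps'
    else gaps'

-- Invariant: in the false state the last True boundary is i-1; in the true state (gap open
-- since gap_start) it is gap_start-1.
lemma main_lemma (xs : List Bool) : ∀ (i gs : Int) (gaps : List (Int × Int)),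
    (resA xs i false gs gaps =
      gaps ++ find_gaps_pairsB ((i - 1) :: find_gaps_trueIdxs xs i ++ [i + (xs.length : Int)])) ∧
    (resA xs i true gs gaps =
      gaps ++ find_gaps_pairsB ((gs - 1) :: find_gaps_trueIdxs xs i ++ [i + (xs.length : Int)])) := by
  induction xs with
  | nil =>
    intro i gs gaps
    constructor
    · simp [resA, find_gaps_loopA, find_gaps_trueIdxs, find_gaps_pairsB]
    · simp [resA, find_gaps_loopA, find_gaps_trueIdxs, find_gaps_pairsB]
      split_ifs with h1 h2 h2 <;> simp_all <;> omega
  | cons b rest ih =>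
    intro i gs gaps
    have hlen : i + ((b :: rest).length : Int) = (i + 1) + (rest.length : Int) := by
      simp; ring
    cases b with
    | false =>
      have ht : find_gaps_trueIdxs (false :: rest) i = find_gaps_trueIdxs rest (i + 1) := by
        simp [find_gaps_trueIdxs]
      constructor
      · have h : resA (false :: rest) i false gs gaps = resA rest (i + 1) true i gaps := by
          simp [resA, find_gaps_loopA]
          ring_nf
        rw [h, (ih (i + 1) i gaps).2, ht, hlen]
      · have h : resA (false :: rest) i true gs gaps = resA rest (i + 1) true gs gaps := by
          simp [resA, find_gaps_loopA]
          ring_nf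
        rw [h, (ih (i + 1) gs gaps).2, ht, hlen]
    | true =>
      have ht : find_gaps_trueIdxs (true :: rest) i = i :: find_gaps_trueIdxs rest (i + 1) := by
        simp [find_gaps_trueIdxs]
      constructor
      · have h : resA (true :: rest) i false gs gaps = resA rest (i + 1) false gs gaps := by
          simp [resA, find_gaps_loopA]
          ring_nf
        rw [h, (ih (i + 1) gs gaps).1, ht, hlen]
        rw [show ((i - 1) :: (i :: find_gaps_trueIdxs rest (i + 1)) ++ [(i + 1) + (rest.length : Int)]) =
          (i - 1) :: i :: (find_gaps_trueIdxs rest (i + 1) ++ [(i + 1) + (rest.length : Int)]) by simp]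
        rw [find_gaps_pairsB]
        rw [if_neg (by omega)]
        simp [show (i + 1) - 1 = i by ring]
      · have h : resA (true :: rest) i true gs gaps =
            resA rest (i + 1) false gs
              (if (i - 1) - gs + 1 ≥ 3 then gaps ++ [(gs, i - 1)] else gaps) := by
          simp [resA, find_gaps_loopA]
          ring_nf
        rw [h, (ih (i + 1) gs _).1, ht, hlen]
        rw [show ((gs - 1) :: (i :: find_gaps_trueIdxs rest (i + 1)) ++ [(i + 1) + (rest.length : Int)]) =
          (gs - 1) :: i :: (find_gaps_trueIdxs rest (i + 1) ++ [(i + 1) + (rest.length : Int)]) by simp]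
        rw [find_gaps_pairsB]
        have hs : (gs - 1) + 1 = gs := by ring
        have hi : (i + 1) - 1 = i := by ring
        split_ifs with h1 h2 h2 <;> simp_all <;> omega

lemma find_gaps_eq (xs : List Bool) : find_gaps xs = find_gaps_alt xs := by
  have h := (main_lemma xs 0 0 []).1
  unfold resA at h
  rw [List.nil_append] at h
  unfold find_gaps find_gaps_alt
  rcases heq : find_gaps_loopA xs 0 false 0 [] with ⟨gaps', g, gs'⟩
  rw [heq] at h
  simp only [zero_add] at h
  have : (0 : Int) - 1 = -1 := by ring
  rw [this] at h
  cases g <;> simp_all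

-- ===== VERDICT (by name: the statement is the Claim_ definition above) =====
theorem find_gaps_spec : Claim_equal_find_gaps := by
  intro xs _
  unfold Spec_find_gaps
  exact find_gaps_eq xs
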